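-- pv_equiv track=rewrite | github.com/fryingpanjoe/black-market | hexgame.py | get_offset
-- ===== SOURCE A (Python) =====
-- def get_offset(tiles):
--     xoff, yoff = len(tiles[0]), len(tiles)
--     x, y = 0, 0
--     for row in tiles:
--         for tile in row:
--             if tile != 0:
--                 if x < xoff:
--                     xoff, yoff = x, y
--                 break
--             x += 1
--         y += 1
--         x = 0
--     return xoff, yoff
-- ===== SOURCE B (Python) =====
-- def get_offset(tiles):
--     width = len(tiles[0])
--     for c in range(width):
--         for y, row in enumerate(tiles):
--             if c < len(row) and row[c] != 0:
--                 return c, y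
--     return width, len(tiles)
-- ===== Notes on version B (the rewrite author's own statement) =====
-- stated objective: alternative
-- what changed: Column-major scan with early return (outer loop over columns up to len(tiles[0]), inner over rows) replaces A's row-major per-row first-nonzero minimization with a running best; the first hit is returned immediately.
-- outside the precondition, e.g. on get_offset([]): A raises IndexError, B raises IndexError
import Mathlib
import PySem

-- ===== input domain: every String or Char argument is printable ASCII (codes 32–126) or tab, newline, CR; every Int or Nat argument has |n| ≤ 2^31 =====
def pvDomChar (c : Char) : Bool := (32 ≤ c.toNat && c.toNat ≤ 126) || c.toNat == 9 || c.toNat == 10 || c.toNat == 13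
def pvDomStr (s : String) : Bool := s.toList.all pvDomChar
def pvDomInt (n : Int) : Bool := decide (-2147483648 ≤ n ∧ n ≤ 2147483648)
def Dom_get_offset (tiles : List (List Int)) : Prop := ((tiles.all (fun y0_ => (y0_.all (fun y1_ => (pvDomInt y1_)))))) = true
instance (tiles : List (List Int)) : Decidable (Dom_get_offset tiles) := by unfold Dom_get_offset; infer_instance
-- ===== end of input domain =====

-- B replaces A's row-major running-minimum scan by a column-major scan returning the first hit.

-- ===== PORT A =====
-- inner 'for tile in row' loop: x counts leading zeros; on the first nonzero,
-- update (xoff, yoff) when x < xoff and break.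
def innerA : List Int → Int → Int → Int → Int → Int × Int
  | [], _, xoff, yoff, _ => (xoff, yoff)
  | t :: rest, x, xoff, yoff, y =>
    if t ≠ 0 then (if x < xoff then (x, y) else (xoff, yoff))
    else innerA rest (x + 1) xoff yoff y

-- outer 'for row in tiles' loop: y is the row index, x restarts at 0 each row.
def outerA : List (List Int) → Int → Int → Int → Int × Int
  | [], xoff, yoff, _ => (xoff, yoff)
  | row :: rest, xoff, yoff, y =>
    let p := innerA row 0 xoff yoff y
    outerA rest p.1 p.2 (y + 1)

def get_offset (tiles : List (List Int)) : Int × Int :=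
  outerA tiles ((tiles.headD []).length : Int) ((tiles.length : Int)) 0

-- ===== PORT B =====
-- inner 'for y, row in enumerate(tiles)' loop at a fixed column c:
-- return (c, y) on the first row with a nonzero at column c.
def scanRowsB : List (List Int) → Nat → Int → Option (Int × Int)
  | [], _, _ => none
  | row :: rest, c, y =>
    if c < row.length ∧ row.getD c 0 ≠ 0 then some ((c : Int), y)
    else scanRowsB rest c (y + 1)

-- outer 'for c in range(width)' loop with early return.
def colsB (tiles : List (List Int)) (w : Nat) (c : Nat) : Int × Int :=
  if _h : c < w then
    match scanRowsB tiles c 0 with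
    | some p => p
    | none => colsB tiles w (c + 1)
  else ((w : Int), (tiles.length : Int))
termination_by w - c

def get_offset_alt (tiles : List (List Int)) : Int × Int :=
  colsB tiles (tiles.headD []).length 0

-- ===== PRECONDITION & SPEC =====
-- Pre_ excludes only tiles = [], where Python A (and B alike) raises IndexError on tiles[0].
def Pre_get_offset (tiles : List (List Int)) : Prop := tiles ≠ []
instance (tiles : List (List Int)) : Decidable (Pre_get_offset tiles) := by unfold Pre_get_offset; infer_instance
def pvWitness_get_offset : List (List Int) := [[0, 1], [0, 0]]

def Spec_get_offset (tiles : List (List Int)) (out : Int × Int) : Prop := out = get_offset_alt tiles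
instance (tiles : List (List Int)) (out : Int × Int) : Decidable (Spec_get_offset tiles out) := by unfold Spec_get_offset; infer_instance

-- ===== CLAIM (what is proved, stated in full; the proofs are below) =====
def Claim_equal_get_offset : Prop := ∀ (tiles : List (List Int)), Dom_get_offset tiles → Pre_get_offset tiles → Spec_get_offset tiles (get_offset tiles)

-- ===== LEMMAS AND PROOFS =====

-- first-nonzero index of a row (the value A's inner loop is driven by)
def fnz : List Int → Option Nat
  | [] => none
  | t :: r => if t ≠ 0 then some 0 else (fnz r).map (· + 1)

-- lexicographically least (first-nonzero column, row index) over all rows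
def bestOf : List (List Int) → Option (Nat × Nat)
  | [] => none
  | row :: rest =>
    match fnz row, bestOf rest with
    | some k, some (k', i') => if k ≤ k' then some (k, 0) else some (k', i' + 1)
    | some k, none => some (k, 0)
    | none, some (k', i') => some (k', i' + 1)
    | none, none => none

theorem innerA_char (row : List Int) : ∀ (x xoff yoff y : Int),
    innerA row x xoff yoff y =
      match fnz row with
      | none => (xoff, yoff)
      | some k => if x + (k : Int) < xoff then (x + (k : Int), y) else (xoff, yoff) := by
  induction row with
  | nil => intro x xoff yoff y; simp [innerA, fnz]
  | cons t rest ih =>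
    intro x xoff yoff y
    by_cases ht : t = 0
    · simp only [innerA, fnz, ht, ne_eq, not_true_eq_false, ite_false, if_false]
      rw [ih]
      cases hr : fnz rest with
      | none => simp
      | some k =>
        simp only [Option.map_some]
        have h1 : x + 1 + (k : Int) = x + ((k : Int) + 1) := by ring
        push_cast
        rw [h1]
    · simp [innerA, fnz, ht]

theorem outerA_char (tiles : List (List Int)) : ∀ (xoff yoff y : Int),
    outerA tiles xoff yoff y =
      match bestOf tiles with
      | none => (xoff, yoff)
      | some (k, i) => if (k : Int) < xoff then ((k : Int), y + (i : Int)) else (xoff, yoff) := by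
  induction tiles with
  | nil => intro xoff yoff y; simp [outerA, bestOf]
  | cons row rest ih =>
    intro xoff yoff y
    simp only [outerA, innerA_char]
    cases hr : fnz row with
    | none =>
      simp only
      rw [ih]
      cases hb : bestOf rest with
      | none => simp [bestOf, hr, hb]
      | some p =>
        obtain ⟨k', i'⟩ := p
        simp only [bestOf, hr, hb]
        push_cast
        split_ifs with h1 <;> simp [h1] <;> ring
    | some k =>
      simp only [zero_add]
      by_cases hk : (k : Int) < xoff
      · rw [if_pos hk, ih]
        cases hb : bestOf rest with
        | none => simp [bestOf, hr, hb, hk]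
        | some p =>
          obtain ⟨k', i'⟩ := p
          simp only [bestOf, hr, hb]
          by_cases hle : k ≤ k'
          · have h1 : ¬ ((k' : Int) < (k : Int)) := by exact_mod_cast not_lt.mpr hle
            simp [hle, h1, hk]
          · have h2 : (k' : Int) < (k : Int) := by exact_mod_cast Nat.lt_of_not_le hle
            have h3 : (k' : Int) < xoff := lt_trans h2 hk
            simp only [if_neg hle, if_pos h2, if_pos h3, Prod.mk.injEq, true_and]
            push_cast
            ring
      · rw [if_neg hk, ih]
        cases hb : bestOf rest with
        | none => simp [bestOf, hr, hb, hk]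
        | some p =>
          obtain ⟨k', i'⟩ := p
          simp only [bestOf, hr, hb]
          by_cases hle : k ≤ k'
          · have h4 : ¬ ((k' : Int) < xoff) := by
              intro h; exact hk (lt_of_le_of_lt (by exact_mod_cast hle) h)
            simp [hle, h4, hk]
          · by_cases h5 : (k' : Int) < xoff
            · simp only [if_neg hle, if_pos h5, Prod.mk.injEq, true_and]
              push_cast
              ring
            · simp [hle, h5]

theorem fnz_some_hit {row : List Int} {k : Nat} (h : fnz row = some k) :
    k < row.length ∧ row.getD k 0 ≠ 0 := by
  induction row generalizing k with
  | nil => simp [fnz] at h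
  | cons t rest ih =>
    simp only [fnz] at h
    by_cases ht : t = 0
    · rw [if_neg (by simp [ht])] at h
      cases hr : fnz rest with
      | none => rw [hr] at h; simp at h
      | some k' =>
        rw [hr] at h; simp at h
        obtain ⟨h1, h2⟩ := ih hr
        have hk : k = k' + 1 := by omega
        subst hk
        simpa using ⟨h1, h2⟩
    · rw [if_pos ht] at h
      simp at h
      have hk : k = 0 := by omega
      subst hk
      simpa using ht

theorem hit_fnz {row : List Int} {c : Nat} (hc : c < row.length) (hv : row.getD c 0 ≠ 0) :
    ∃ k, fnz row = some k ∧ k ≤ c := by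
  induction row generalizing c with
  | nil => simp at hc
  | cons t rest ih =>
    by_cases ht : t = 0
    · cases c with
      | zero => simp [ht] at hv
      | succ c' =>
        obtain ⟨k, hk, hkc⟩ := ih (by simpa using hc) (by simpa using hv)
        exact ⟨k + 1, by simp [fnz, ht, hk], by omega⟩
    · exact ⟨0, by simp [fnz, ht], Nat.zero_le _⟩

theorem bestOf_none {tiles : List (List Int)} (h : bestOf tiles = none) :
    ∀ row ∈ tiles, fnz row = none := by
  induction tiles with
  | nil => simp
  | cons row rest ih =>
    intro r hr
    simp only [bestOf] at h
    cases h1 : fnz row with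
    | some k =>
      cases h2 : bestOf rest with
      | none => rw [h1, h2] at h; simp at h
      | some p =>
        obtain ⟨a, b⟩ := p
        rw [h1, h2] at h
        have h' : (if k ≤ a then some (k, (0 : Nat)) else some (a, b + 1)) = none := h
        by_cases hle : k ≤ a
        · rw [if_pos hle] at h'; simp at h'
        · rw [if_neg hle] at h'; simp at h'
    | none =>
      cases h2 : bestOf rest with
      | some p => obtain ⟨a, b⟩ := p; rw [h1, h2] at h; simp at h
      | none =>
        rcases List.mem_cons.mp hr with rfl | hr'
        · exact h1
        · exact ih h2 r hr'

theorem bestOf_some {tiles : List (List Int)} {k i : Nat} (h : bestOf tiles = some (k, i)) :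
    (∃ row, tiles[i]? = some row ∧ fnz row = some k) ∧
    (∀ j row' k', tiles[j]? = some row' → fnz row' = some k' →
      k < k' ∨ (k = k' ∧ i ≤ j)) := by
  induction tiles generalizing k i with
  | nil => simp [bestOf] at h
  | cons row rest ih =>
    simp only [bestOf] at h
    cases h1 : fnz row with
    | none =>
      cases h2 : bestOf rest with
      | none => rw [h1, h2] at h; simp at h
      | some p =>
        obtain ⟨k', i'⟩ := p
        rw [h1, h2] at h
        simp at h
        obtain ⟨hk, hi⟩ := h
        subst hk
        obtain ⟨⟨r, hr, hfr⟩, hmin⟩ := ih h2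
        constructor
        · exact ⟨r, by simpa [← hi] using hr, hfr⟩
        · intro j row' k'' hj hf
          cases j with
          | zero => simp at hj; rw [hj] at h1; rw [h1] at hf; simp at hf
          | succ j' =>
            rcases hmin j' row' k'' (by simpa using hj) hf with hlt | ⟨he, hle⟩
            · exact Or.inl hlt
            · exact Or.inr ⟨he, by omega⟩
    | some kr =>
      cases h2 : bestOf rest with
      | none =>
        rw [h1, h2] at h; simp at h
        obtain ⟨hk, hi⟩ := h
        subst hk
        constructor
        · exact ⟨row, by simp [← hi], h1⟩
        · intro j row' k'' hj hf
          cases j with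
          | zero =>
            simp at hj; rw [hj] at h1
            rw [h1] at hf; simp at hf
            exact Or.inr ⟨by omega, by omega⟩
          | succ j' =>
            have hz := bestOf_none h2 row' (List.mem_of_getElem? (by simpa using hj))
            rw [hz] at hf; simp at hf
      | some p =>
        obtain ⟨k', i'⟩ := p
        rw [h1, h2] at h
        have h' : (if kr ≤ k' then some (kr, (0 : Nat)) else some (k', i' + 1)) = some (k, i) := h
        obtain ⟨⟨r, hr, hfr⟩, hmin⟩ := ih h2
        by_cases hle : kr ≤ k'
        · rw [if_pos hle] at h'; simp at h'
          obtain ⟨hk, hi⟩ := h'; subst hk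
          constructor
          · exact ⟨row, by simp [← hi], h1⟩
          · intro j row' k'' hj hf
            cases j with
            | zero =>
              simp at hj; rw [hj] at h1; rw [h1] at hf; simp at hf
              exact Or.inr ⟨by omega, by omega⟩
            | succ j' =>
              rcases hmin j' row' k'' (by simpa using hj) hf with hlt | ⟨he, _⟩
              · exact Or.inl (by omega)
              · by_cases heq : kr = k''
                · exact Or.inr ⟨heq, by omega⟩
                · exact Or.inl (by omega)
        · rw [if_neg hle] at h'; simp at h'
          obtain ⟨hk, hi⟩ := h'; subst hk
          constructor
          · exact ⟨r, by simpa [← hi] using hr, hfr⟩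
          · intro j row' k'' hj hf
            cases j with
            | zero =>
              simp at hj; rw [hj] at h1; rw [h1] at hf; simp at hf
              exact Or.inl (by omega)
            | succ j' =>
              rcases hmin j' row' k'' (by simpa using hj) hf with hlt | ⟨he, hle'⟩
              · exact Or.inl hlt
              · exact Or.inr ⟨he, by omega⟩

theorem bestOf_exists {tiles : List (List Int)} {row : List Int} {k : Nat}
    (hm : row ∈ tiles) (hf : fnz row = some k) : ∃ p, bestOf tiles = some p := by
  cases h : bestOf tiles with
  | none => rw [bestOf_none h row hm] at hf; simp at hf
  | some p => exact ⟨p, rfl⟩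

theorem scanRows_none {tiles : List (List Int)} {c : Nat} : ∀ (y : Int),
    scanRowsB tiles c y = none ↔ ∀ row ∈ tiles, ¬ (c < row.length ∧ row.getD c 0 ≠ 0) := by
  induction tiles with
  | nil => intro y; simp [scanRowsB]
  | cons row rest ih =>
    intro y
    by_cases h : c < row.length ∧ row.getD c 0 ≠ 0
    · rw [scanRowsB, if_pos h]
      constructor
      · intro hc; simp at hc
      · intro hall; exact absurd h (hall row (by simp))
    · rw [scanRowsB, if_neg h, ih (y + 1)]
      constructor
      · intro hall r hr
        rcases List.mem_cons.mp hr with rfl | hr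
        · exact h
        · exact hall r hr
      · intro hall r hr
        exact hall r (List.mem_cons_of_mem _ hr)

theorem scanRows_first {tiles : List (List Int)} {c : Nat} : ∀ {i : Nat} {row : List Int},
    tiles[i]? = some row → (c < row.length ∧ row.getD c 0 ≠ 0) →
    (∀ j row', j < i → tiles[j]? = some row' → ¬ (c < row'.length ∧ row'.getD c 0 ≠ 0)) →
    ∀ (y : Int), scanRowsB tiles c y = some ((c : Int), y + (i : Int)) := by
  induction tiles with
  | nil => intro i row hi; simp at hi
  | cons r rest ih =>
    intro i row hi hhit hbefore y
    cases i with
    | zero =>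
      simp at hi; subst hi
      rw [scanRowsB, if_pos hhit]
      norm_num
    | succ i' =>
      have hr0 : ¬ (c < r.length ∧ r.getD c 0 ≠ 0) :=
        hbefore 0 r (by omega) (by simp)
      simp only [scanRowsB, if_neg hr0]
      rw [ih (by simpa using hi) hhit
        (fun j row' hj hj2 => hbefore (j + 1) row' (by omega) (by simpa using hj2)) (y + 1)]
      congr 2
      push_cast
      ring

theorem colsB_char (tiles : List (List Int)) (w : Nat) : ∀ (c : Nat),
    (∀ c' < c, ∀ row ∈ tiles, ¬ (c' < row.length ∧ row.getD c' 0 ≠ 0)) →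
    colsB tiles w c =
      match bestOf tiles with
      | none => ((w : Int), (tiles.length : Int))
      | some (k, i) => if k < w then ((k : Int), (i : Int)) else ((w : Int), (tiles.length : Int)) := by
  intro c
  induction hwf : w - c using Nat.strong_induction_on generalizing c with
  | _ n ihn =>
  intro hno
  subst hwf
  have key : ∀ k i, bestOf tiles = some (k, i) → c ≤ k := by
    intro k i hb
    obtain ⟨⟨r, hr, hfr⟩, _⟩ := bestOf_some hb
    obtain ⟨hk1, hk2⟩ := fnz_some_hit hfr
    by_contra hlt
    exact hno k (by omega) r (List.mem_of_getElem? hr) ⟨hk1, hk2⟩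
  by_cases hcw : c < w
  · rw [colsB, dif_pos hcw]
    cases hs : scanRowsB tiles c 0 with
    | none =>
      have hnone := (scanRows_none (tiles := tiles) (c := c) 0).mp hs
      have hno' : ∀ c' < c + 1, ∀ row ∈ tiles, ¬ (c' < row.length ∧ row.getD c' 0 ≠ 0) := by
        intro c' hc' row hrow
        by_cases h : c' = c
        · exact h ▸ hnone row hrow
        · exact hno c' (by omega) row hrow
      exact ihn (w - (c + 1)) (by omega) (c + 1) rfl hno'
    | some p =>
      -- some row hits at column c; bestOf must be some (c, i) with i the first hitting row
      have hex : ∃ row ∈ tiles, c < row.length ∧ row.getD c 0 ≠ 0 := by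
        by_contra hne
        push_neg at hne
        rw [(scanRows_none (tiles := tiles) (c := c) 0).mpr
          (fun row hr hh => hh.2 (hne row hr hh.1))] at hs
        simp at hs
      obtain ⟨row, hrow, hhit⟩ := hex
      obtain ⟨kr, hkr, hkrc⟩ := hit_fnz hhit.1 hhit.2
      obtain ⟨⟨k, i⟩, hb⟩ := bestOf_exists hrow hkr
      obtain ⟨⟨r, hr, hfr⟩, hmin⟩ := bestOf_some hb
      obtain ⟨j, hjr⟩ := List.getElem?_of_mem hrow
      have hkk : k ≤ kr := by
        rcases hmin j row kr hjr hkr with hlt | ⟨he, _⟩ <;> omega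
      have hck : k = c := le_antisymm (le_trans hkk hkrc) (key k i hb)
      subst hck
      have hfirst : ∀ j' row', j' < i → tiles[j']? = some row' →
          ¬ (k < row'.length ∧ row'.getD k 0 ≠ 0) := by
        intro j' row' hj' hjr' hh
        obtain ⟨k'', hk'', hk''le⟩ := hit_fnz hh.1 hh.2
        rcases hmin j' row' k'' hjr' hk'' with hlt | ⟨he, hle⟩
        · obtain ⟨hk1, hk2⟩ := fnz_some_hit hk''
          exact hno k'' (by omega) row' (List.mem_of_getElem? hjr') ⟨hk1, hk2⟩
        · omega
      have hrhit : k < r.length ∧ r.getD k 0 ≠ 0 := fnz_some_hit hfr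
      rw [scanRows_first hr hrhit hfirst 0] at hs
      simp at hs
      rw [hb]
      simp only
      rw [if_pos hcw, ← hs]
  · rw [colsB, dif_neg hcw]
    cases hb : bestOf tiles with
    | none => simp
    | some p =>
      obtain ⟨k, i⟩ := p
      have h1 := key k i hb
      have h2 : ¬ k < w := by omega
      simp [h2]

-- ===== VERDICT (by name: the statement is the Claim_ definition above) =====
theorem get_offset_spec : Claim_equal_get_offset := by
  intro tiles _hdom _hpre
  unfold Spec_get_offset get_offset get_offset_alt
  rw [outerA_char, colsB_char tiles (tiles.headD []).length 0 (by omega)]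
  cases hb : bestOf tiles with
  | none => simp
  | some p =>
    obtain ⟨k, i⟩ := p
    simp only
    by_cases h : k < (tiles.headD []).length
    · have h' : (k : Int) < ((tiles.headD []).length : Int) := by exact_mod_cast h
      simp [h, h']
    · have h' : ¬ ((k : Int) < ((tiles.headD []).length : Int)) := by exact_mod_cast h
      simp [h, h']
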